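-- pv_equiv track=rewrite | github.com/neilyneilynig/Sloth-bytes | Code.py | vertical_txt
-- ===== SOURCE A (Python) =====
-- def vertical_txt(text):
--     words = text.split()
--     max_len = max(len(word) for word in words)
--
--     result = []
--
--     for i in range(max_len):
--         row = []
--         for word in words:
--             if i < len(word):
--                 row.append(word[i])
--             else:
--                 row.append(" ")
--         result.append(row)
--
--     return result
-- ===== SOURCE B (Python) =====
-- def vertical_txt(text):
--     cols = text.split()
--     result = []
--     while any(cols):
--         result.append([w[:1] or " " for w in cols])
--         cols = [w[1:] for w in cols]
--     return result
-- ===== Notes on version B (the rewrite author's own statement) =====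
-- stated objective: alternative
-- what changed: Instead of computing the maximum word length and indexing every word with a bounds check per row, B repeatedly peels the first character off every word (emitting one row per pass) until all words are exhausted, so no length maximum and no indexing occur.
import Mathlib
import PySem

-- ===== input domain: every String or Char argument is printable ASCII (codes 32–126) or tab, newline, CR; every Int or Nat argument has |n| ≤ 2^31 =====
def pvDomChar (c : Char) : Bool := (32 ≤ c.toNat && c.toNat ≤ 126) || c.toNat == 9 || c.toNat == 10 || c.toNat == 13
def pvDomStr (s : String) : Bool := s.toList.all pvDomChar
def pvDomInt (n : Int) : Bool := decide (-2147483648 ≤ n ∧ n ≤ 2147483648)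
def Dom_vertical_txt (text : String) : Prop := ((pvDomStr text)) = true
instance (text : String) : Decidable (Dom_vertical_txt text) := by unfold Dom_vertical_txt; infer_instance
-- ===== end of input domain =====

-- B peels the first character off every word per row until all words are empty, instead of A's
-- max-length computation and index loop with bounds checks; objective: alternative.

-- ===== PORT A =====
def vertical_txt (text : String) : List (List String) :=
  let words := PySem.Str.split₀ text
  let max_len := ((PySem.List.max? (words.map (fun w => PySem.Str.len w)) (fun y => y)).getD 0)
  (PySem.List.pyRange 0 max_len 1).foldl
    (fun result i =>
      result ++ [words.foldl
        (fun row word =>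
          row ++ [if i < PySem.Str.len word
                  then String.ofList [(PySem.Str.pyGet? word i).getD ' ']
                  else " "]) []])
    []

-- ===== PORT B =====
-- the while-loop of Source B: while any word nonempty, emit [w[:1] or " " for w in cols] and take tails.
-- (w[:1] is the one-character prefix string, exact via the head of the char list; w[1:] is List.tail.)
def pvPeel (ws : List (List Char)) : List (List String) :=
  if _h : ws.any (fun w => !w.isEmpty) then
    (ws.map (fun w => match w with | [] => " " | c :: _ => String.ofList [c]))
      :: pvPeel (ws.map List.tail)
  else []
termination_by (ws.map List.length).sum
decreasing_by
  have hx : ∃ w ∈ ws, w ≠ [] := by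
    rcases List.any_eq_true.mp _h with ⟨w, hw, hwb⟩
    exact ⟨w, hw, by simpa [List.isEmpty_eq_false_iff] using hwb⟩
  have key : (ws.map (fun w => w.tail.length)).sum < (ws.map List.length).sum := by
    apply List.sum_lt_sum
    · intro w _; simp [List.length_tail]
    · rcases hx with ⟨w, hw, hwne⟩
      exact ⟨w, hw, by cases w with | nil => exact absurd rfl hwne | cons a t => simp⟩
  simpa [Function.comp_def] using key

def vertical_txt_alt (text : String) : List (List String) :=
  pvPeel ((PySem.Str.split₀ text).map String.toList)

-- ===== PRECONDITION & SPEC =====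
-- Pre_ excludes exactly the inputs with no words (empty/whitespace-only text), where A's max(...) raises ValueError.
def Pre_vertical_txt (text : String) : Prop := PySem.Str.split₀ text ≠ []
instance (text : String) : Decidable (Pre_vertical_txt text) := by unfold Pre_vertical_txt; infer_instance

def pvWitness_vertical_txt : String := "ab c"

def Spec_vertical_txt (text : String) (out : List (List String)) : Prop := out = vertical_txt_alt text
instance (text : String) (out : List (List String)) : Decidable (Spec_vertical_txt text out) := by unfold Spec_vertical_txt; infer_instance

-- ===== CLAIM (what is proved, stated in full; the proofs are below) =====
def Claim_equal_vertical_txt : Prop := ∀ (text : String), Dom_vertical_txt text → Pre_vertical_txt text → Spec_vertical_txt text (vertical_txt text)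

-- ===== LEMMAS AND PROOFS =====

theorem pv_foldl_push {α β : Type} (f : α → β) (l : List α) (acc : List β) :
    l.foldl (fun r x => r ++ [f x]) acc = acc ++ l.map f := by
  induction l generalizing acc with
  | nil => simp
  | cons x t ih => simp [List.foldl_cons, ih]

-- peeling ws with maximal word length M produces exactly the M indexed rows
theorem pvPeel_eq (M : Nat) (ws : List (List Char))
    (hle : ∀ w ∈ ws, w.length ≤ M) (hex : ∃ w ∈ ws, w.length = M) :
    pvPeel ws = (List.range M).map
      (fun i => ws.map (fun w => if i < w.length then String.ofList [w.getD i ' '] else " ")) := by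
  induction M generalizing ws with
  | zero =>
    rw [pvPeel.eq_def]
    have : ¬ ws.any (fun w => !w.isEmpty) = true := by
      intro hany
      rcases List.any_eq_true.mp hany with ⟨w, hw, hwb⟩
      have := hle w hw
      simp [List.isEmpty_eq_false_iff] at hwb
      exact hwb (List.eq_nil_of_length_eq_zero (Nat.le_zero.mp this))
    rw [dif_neg this]; simp
  | succ M ih =>
    rw [pvPeel.eq_def]
    have hany : ws.any (fun w => !w.isEmpty) = true := by
      rcases hex with ⟨w, hw, hwl⟩
      apply List.any_eq_true.mpr
      refine ⟨w, hw, ?_⟩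
      simp [List.isEmpty_eq_false_iff]
      intro hnil; rw [hnil] at hwl; simp at hwl
    rw [dif_pos hany]
    have hle' : ∀ w ∈ ws.map List.tail, w.length ≤ M := by
      intro w hw
      rcases List.mem_map.mp hw with ⟨v, hv, rfl⟩
      have := hle v hv
      simp [List.length_tail]; omega
    have hex' : ∃ w ∈ ws.map List.tail, w.length = M := by
      rcases hex with ⟨w, hw, hwl⟩
      exact ⟨w.tail, List.mem_map_of_mem hw, by simp [List.length_tail, hwl]⟩
    rw [ih (ws.map List.tail) hle' hex', List.range_succ_eq_map]
    simp only [List.map_cons, List.map_map]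
    congr 1
    · apply List.map_congr_left
      intro w _
      cases w with
      | nil => simp
      | cons a t => simp [List.getD]
    · apply List.map_congr_left
      intro i _
      simp only [Function.comp_def]
      apply List.map_congr_left
      intro w _
      cases w with
      | nil => simp
      | cons a t => simp [List.getD]

theorem vertical_txt_spec_aux (text : String) (hpre : PySem.Str.split₀ text ≠ []) :
    vertical_txt text = vertical_txt_alt text := by
  unfold vertical_txt vertical_txt_alt
  rcases hw : PySem.Str.split₀ text with _ | ⟨w0, rest⟩
  · exact absurd hw hpre
  simp only [List.map_cons, PySem.List.max?_id_cons, Option.getD_some]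
  set m : Int := (rest.map (fun w => PySem.Str.len w)).foldl max (PySem.Str.len w0) with hm
  have hlenstr : ∀ s : String, PySem.Str.len s = (s.toList.length : Int) := by
    intro s; simp [PySem.Str.len_eq]
  have hmax : ∀ s ∈ w0 :: rest, PySem.Str.len s ≤ m := by
    intro s hs
    rcases List.mem_cons.mp hs with rfl | hs
    · exact (PySem.List.le_foldl_max _ _).1
    · exact (PySem.List.le_foldl_max _ _).2 _ (List.mem_map_of_mem hs)
  have hmem : ∃ s ∈ w0 :: rest, PySem.Str.len s = m := by
    rcases PySem.List.foldl_max_mem (rest.map (fun w => PySem.Str.len w)) (PySem.Str.len w0) with h | h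
    · exact ⟨w0, by simp, h.symm⟩
    · rcases List.mem_map.mp h with ⟨s, hs, hsl⟩
      exact ⟨s, List.mem_cons_of_mem _ hs, hsl⟩
  have hm0 : 0 ≤ m := le_trans (by simp) (hmax w0 (by simp))
  set M : Nat := m.toNat with hM
  have hmM : m = (M : Int) := by omega
  have hleN : ∀ w ∈ (w0 :: rest).map String.toList, w.length ≤ M := by
    intro w hwm
    rcases List.mem_map.mp hwm with ⟨s, hs, rfl⟩
    have := hmax s hs
    rw [hlenstr, hmM] at this
    exact_mod_cast this
  have hexN : ∃ w ∈ (w0 :: rest).map String.toList, w.length = M := by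
    rcases hmem with ⟨s, hs, hsl⟩
    refine ⟨s.toList, List.mem_map_of_mem hs, ?_⟩
    rw [hlenstr, hmM] at hsl
    exact_mod_cast hsl
  clear_value M
  clear_value m
  rw [pv_foldl_push, List.nil_append, hmM, PySem.List.pyRange_zero_natCast, List.map_map,
      show w0.toList :: List.map String.toList rest = (w0 :: rest).map String.toList from by simp,
      pvPeel_eq M _ hleN hexN]
  apply List.map_congr_left
  intro i hi
  simp only [Function.comp_def, List.map_map]
  rw [pv_foldl_push, List.nil_append]
  apply List.map_congr_left
  intro s _
  by_cases hc : i < s.toList.length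
  · rw [if_pos hc, if_pos (by rw [hlenstr]; exact_mod_cast hc)]
    rw [PySem.Str.pyGet?_natCast]
    simp [List.getD_eq_getElem?_getD, List.getElem?_eq_getElem hc]
  · rw [if_neg hc, if_neg (by rw [hlenstr]; exact fun hlt => hc (by exact_mod_cast hlt))]

-- ===== VERDICT (by name: the statement is the Claim_ definition above) =====
theorem vertical_txt_spec : Claim_equal_vertical_txt := by
  intro text _ hpre
  exact vertical_txt_spec_aux text hpre
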